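-- pv_equiv track=rewrite | github.com/Laszer271/MusicGeneration | representations.py | gen_to_midi
-- ===== SOURCE A (Python) =====
-- def gen_to_midi(vec):
--     midi_vec = []
--     midi_durations = []
--     duration_counter = 0
--     for n in vec:
--         if n != -2:
--             midi_vec.append(n)
--             if duration_counter:
--                 midi_durations.append(duration_counter)
--             duration_counter = 1
--         else:
--             duration_counter += 1
--     midi_durations.append(duration_counter)
--     return midi_vec, midi_durations
-- ===== SOURCE B (Python) =====
-- def gen_to_midi(vec):
--     midi_vec = [n for n in vec if n != -2]
--     idx = [i for i, n in enumerate(vec) if n != -2]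
--     if not idx:
--         return midi_vec, [len(vec)]
--     durations = [idx[0]] if idx[0] > 0 else []
--     durations += [b - a for a, b in zip(idx, idx[1:])]
--     durations.append(len(vec) - idx[-1])
--     return midi_vec, durations
-- ===== Notes on version B (the rewrite author's own statement) =====
-- stated objective: alternative
-- what changed: Replaces the streaming running-counter loop with onset-index extraction followed by adjacent-difference computation (gaps between note positions, plus the leading phantom entry and final run length).
import Mathlib
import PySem

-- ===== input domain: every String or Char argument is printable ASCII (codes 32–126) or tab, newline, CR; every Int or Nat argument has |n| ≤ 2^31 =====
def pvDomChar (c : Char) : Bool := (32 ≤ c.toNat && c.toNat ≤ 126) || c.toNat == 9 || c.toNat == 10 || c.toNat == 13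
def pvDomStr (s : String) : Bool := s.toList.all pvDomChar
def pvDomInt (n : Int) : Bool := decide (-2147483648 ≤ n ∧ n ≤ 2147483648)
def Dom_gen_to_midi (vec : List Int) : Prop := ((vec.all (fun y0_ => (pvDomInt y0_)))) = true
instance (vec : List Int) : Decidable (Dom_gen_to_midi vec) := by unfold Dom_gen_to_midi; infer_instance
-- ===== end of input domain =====

-- B is an alternative decomposition (onset-index extraction + adjacent differences instead of a
-- streaming running counter); equivalence of the return values is proved for all inputs.

-- ===== PORT A =====
-- the for-loop over vec with state (midi_vec, midi_durations, duration_counter)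
def gen_to_midi (vec : List Int) : List Int × List Int :=
  let s := vec.foldl
    (fun (st : List Int × List Int × Int) n =>
      if n ≠ -2 then
        (st.1 ++ [n], (if st.2.2 ≠ 0 then st.2.1 ++ [st.2.2] else st.2.1), 1)
      else
        (st.1, st.2.1, st.2.2 + 1))
    ([], [], 0)
  (s.1, s.2.1 ++ [s.2.2])

-- ===== PORT B =====
def gen_to_midi_alt (vec : List Int) : List Int × List Int :=
  let midi_vec := vec.filter (fun n => decide (n ≠ -2))
  let idx := ((PySem.List.enumerate vec).filter (fun p => decide (p.2 ≠ -2))).map (fun p => p.1)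
  if idx = [] then (midi_vec, [(vec.length : Int)])
  else
    -- idx[0] and idx[-1] on the nonempty idx: headD 0 / getLastD 0 are exact here
    let durations := if idx.headD 0 > 0 then [idx.headD 0] else []
    let durations := durations ++ (idx.zip idx.tail).map (fun p => p.2 - p.1)
    let durations := durations ++ [(vec.length : Int) - idx.getLastD 0]
    (midi_vec, durations)

-- ===== PRECONDITION & SPEC =====
def Spec_gen_to_midi (vec : List Int) (out : List Int × List Int) : Prop := out = gen_to_midi_alt vec
instance (vec : List Int) (out : List Int × List Int) : Decidable (Spec_gen_to_midi vec out) := by unfold Spec_gen_to_midi; infer_instance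

-- ===== CLAIM (what is proved, stated in full; the proofs are below) =====
def Claim_equal_gen_to_midi : Prop := ∀ (vec : List Int), Dom_gen_to_midi vec → Spec_gen_to_midi vec (gen_to_midi vec)

-- ===== LEMMAS AND PROOFS =====

-- A's durations, as a direct recursion: `runs vec c` = durations emitted with pending counter c,
-- including the final append of the counter.
def runs : List Int → Int → List Int
  | [], c => [c]
  | n :: t, c =>
    if n ≠ -2 then (if c ≠ 0 then c :: runs t 1 else runs t 1) else runs t (c + 1)

def gaps (l : List Int) : List Int := (l.zip l.tail).map (fun p => p.2 - p.1)

def noteIdx (vec : List Int) (s : Int) : List Int :=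
  ((PySem.List.enumerate vec s).filter (fun p => decide (p.2 ≠ -2))).map (fun p => p.1)

theorem noteIdx_nil (s : Int) : noteIdx [] s = [] := by simp [noteIdx, PySem.List.enumerate]

theorem noteIdx_cons (n : Int) (t : List Int) (s : Int) :
    noteIdx (n :: t) s = if n ≠ -2 then s :: noteIdx t (s + 1) else noteIdx t (s + 1) := by
  simp only [noteIdx, PySem.List.enumerate_cons, List.filter_cons]
  split <;> simp_all

theorem noteIdx_ge (t : List Int) (s x : Int) (hx : x ∈ noteIdx t s) : s ≤ x := by
  induction t generalizing s with
  | nil => simp [noteIdx_nil] at hx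
  | cons n t ih =>
    rw [noteIdx_cons] at hx
    split at hx
    · rcases List.mem_cons.1 hx with h | h
      · omega
      · have := ih (s + 1) h; omega
    · have := ih (s + 1) hx; omega

-- B's duration formula, with a generic pending counter c and index offset i
def bdurs (vec : List Int) (c i : Int) : List Int :=
  let idx := noteIdx vec i
  if idx = [] then [c + (vec.length : Int)]
  else
    (if c + (idx.headD 0 - i) ≠ 0 then [c + (idx.headD 0 - i)] else [])
      ++ gaps idx ++ [(i + (vec.length : Int)) - idx.getLastD 0]

theorem runs_formula (vec : List Int) : ∀ (c i : Int), 0 ≤ c → runs vec c = bdurs vec c i := by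
  induction vec with
  | nil => intro c i _; simp [runs, bdurs, noteIdx_nil]
  | cons n t ih =>
    intro c i hc
    by_cases hn : n = -2
    · -- sustain step: counter grows, indices are the same list
      subst hn
      have h1 : runs (-2 :: t) c = runs t (c + 1) := by simp [runs]
      have h2 : noteIdx (-2 :: t) i = noteIdx t (i + 1) := by
        rw [noteIdx_cons]; simp
      rw [h1, ih (c + 1) (i + 1) (by omega)]
      simp only [bdurs, h2]
      by_cases hL : noteIdx t (i + 1) = []
      · rw [if_pos hL, if_pos hL]
        have : c + 1 + (t.length : Int) = c + (((-2 :: t).length : Int)) := by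
          simp [List.length_cons]; ring
        rw [this]
      · rw [if_neg hL, if_neg hL]
        have e1 : c + 1 + ((noteIdx t (i + 1)).headD 0 - (i + 1))
            = c + ((noteIdx t (i + 1)).headD 0 - i) := by ring
        have e2 : (i + 1) + (t.length : Int) = i + (((-2 :: t).length : Int)) := by
          simp [List.length_cons]; ring
        rw [e1, e2]
    · -- note step
      have h1 : runs (n :: t) c = if c ≠ 0 then c :: runs t 1 else runs t 1 := by
        simp [runs, hn]
      have h2 : noteIdx (n :: t) i = i :: noteIdx t (i + 1) := by
        rw [noteIdx_cons]; simp [hn]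
      have key : runs t 1 =
          gaps (i :: noteIdx t (i + 1))
            ++ [(i + (((n :: t).length : Int))) - (i :: noteIdx t (i + 1)).getLastD 0] := by
        rw [ih 1 (i + 1) (by omega)]
        simp only [bdurs]
        by_cases hL : noteIdx t (i + 1) = []
        · rw [if_pos hL, hL]
          have : gaps [i] = [] := by simp [gaps]
          rw [this]
          have : (1 : Int) + (t.length : Int) = i + (((n :: t).length : Int)) - [i].getLastD 0 := by
            simp [List.length_cons, List.getLastD]; ring
          simp [this]
        · obtain ⟨f, r, hfr⟩ := List.exists_cons_of_ne_nil hL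
          rw [if_neg hL, hfr]
          have hf : i + 1 ≤ f := noteIdx_ge t (i + 1) f (by rw [hfr]; exact List.mem_cons_self ..)
          have hcond : (1 : Int) + ((f :: r).headD 0 - (i + 1)) ≠ 0 := by
            simp [List.headD]; omega
          rw [if_pos hcond]
          have e1 : (1 : Int) + ((f :: r).headD 0 - (i + 1)) = f - i := by
            simp [List.headD]; ring
          have e2 : gaps (i :: f :: r) = (f - i) :: gaps (f :: r) := by
            simp [gaps, List.zip]
          have e3 : (i :: f :: r).getLastD 0 = (f :: r).getLastD 0 := by
            rw [List.getLastD_cons, List.getLastD_cons, List.getLastD_cons]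
          have e4 : (i + 1) + (t.length : Int) = i + (((n :: t).length : Int)) := by
            simp [List.length_cons]; ring
          rw [e1, e2, e3, e4]
          simp
      have hne : (i :: noteIdx t (i + 1)) ≠ [] := List.cons_ne_nil _ _
      have hhead : ((i :: noteIdx t (i + 1)).headD 0) = i := by simp [List.headD]
      by_cases hc0 : c = 0
      · rw [h1, if_neg (show ¬(c ≠ 0) by simp [hc0])]
        simp only [bdurs, h2]
        rw [if_neg hne, hhead]
        rw [if_neg (show ¬(c + (i - i) ≠ 0) by omega)]
        simpa using key
      · rw [h1, if_pos (show c ≠ 0 from hc0)]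
        simp only [bdurs, h2]
        rw [if_neg hne, hhead]
        rw [if_pos (show c + (i - i) ≠ 0 by omega)]
        have : c + (i - i) = c := by ring
        rw [this]
        simpa using key

-- A's fold, characterised with generic accumulators
def runsD : List Int → Int → List Int
  | [], _ => []
  | n :: t, c =>
    if n ≠ -2 then (if c ≠ 0 then [c] else []) ++ runsD t 1 else runsD t (c + 1)

def runsC : List Int → Int → Int
  | [], c => c
  | n :: t, c => if n ≠ -2 then runsC t 1 else runsC t (c + 1)

theorem foldA (vec : List Int) : ∀ (mv md : List Int) (c : Int),
    vec.foldl
      (fun (st : List Int × List Int × Int) n =>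
        if n ≠ -2 then
          (st.1 ++ [n], (if st.2.2 ≠ 0 then st.2.1 ++ [st.2.2] else st.2.1), 1)
        else
          (st.1, st.2.1, st.2.2 + 1))
      (mv, md, c)
    = (mv ++ vec.filter (fun n => decide (n ≠ -2)), md ++ runsD vec c, runsC vec c) := by
  induction vec with
  | nil => intro mv md c; simp [runsD, runsC]
  | cons n t ih =>
    intro mv md c
    simp only [List.foldl_cons]
    by_cases hn : n = -2
    · subst hn
      rw [if_neg (show ¬((-2 : Int) ≠ -2) by decide)]
      rw [ih]
      simp [runsD, runsC]
    · rw [if_pos (show n ≠ -2 from hn)]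
      by_cases hc : c = 0
      · rw [if_neg (show ¬(c ≠ 0) by simp [hc])]
        rw [ih]
        simp [runsD, runsC, hn, hc]
      · rw [if_pos (show c ≠ 0 from hc)]
        rw [ih]
        simp [runsD, runsC, hn, hc]

theorem runsD_runsC (vec : List Int) : ∀ c : Int,
    runsD vec c ++ [runsC vec c] = runs vec c := by
  induction vec with
  | nil => intro c; simp [runsD, runsC, runs]
  | cons n t ih =>
    intro c
    by_cases hn : n = -2
    · subst hn; simp [runsD, runsC, runs, ih]
    · by_cases hc : c = 0 <;> simp [runsD, runsC, runs, hn, hc, ih]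

theorem noteIdx_zero (vec : List Int) :
    ((PySem.List.enumerate vec).filter (fun p => decide (p.2 ≠ -2))).map (fun p => p.1)
      = noteIdx vec 0 := rfl

-- ===== VERDICT (by name: the statement is the Claim_ definition above) =====
theorem gen_to_midi_spec : Claim_equal_gen_to_midi := by
  intro vec _
  unfold Spec_gen_to_midi gen_to_midi gen_to_midi_alt
  rw [foldA]
  simp only [List.nil_append, noteIdx_zero]
  rw [runsD_runsC, runs_formula vec 0 0 (by omega)]
  simp only [bdurs]
  by_cases hnil : noteIdx vec 0 = []
  · rw [if_pos hnil, if_pos hnil]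
    simp
  · rw [if_neg hnil, if_neg hnil]
    obtain ⟨f, r, hfr⟩ := List.exists_cons_of_ne_nil hnil
    have hf : (0 : Int) ≤ f := noteIdx_ge vec 0 f (by rw [hfr]; exact List.mem_cons_self ..)
    rw [hfr]
    have hhead : ((f :: r).headD 0) = f := by simp [List.headD]
    rw [hhead]
    have hcond : ((0 : Int) + (f - 0) ≠ 0) ↔ (f > 0) := by omega
    have e0 : (0 : Int) + (f - 0) = f := by ring
    have e1 : (0 : Int) + (vec.length : Int) = (vec.length : Int) := by ring
    rw [e0, e1]
    by_cases hfz : f > 0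
    · rw [if_pos (by omega), if_pos hfz]
      simp [gaps]
    · rw [if_neg (by omega), if_neg hfz]
      simp [gaps]
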